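-- pv_equiv track=rewrite | github.com/RealChAuLa/DSA_CW | tower_of_hanoi/algorithm.py | hanoi_frame_stewart
-- ===== SOURCE A (Python) =====
-- def hanoi_frame_stewart(n, source='A', target='D', aux1='B', aux2='C'):
--     """4-peg Frame-Stewart algorithm - O(2^sqrt(2n)), uses DP for optimal k"""
--     if not isinstance(n, int) or n < 0:
--         raise ValueError("Number of disks must be a non-negative integer")
--     if n == 0:
--         return []
--
--     moves = []
--
--     # DP to find optimal split point k
--     dp = {0: 0, 1: 1}
--     k_opt = {0: 0, 1: 0}
--
--     for i in range(2, n + 1):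
--         dp[i] = float('inf')
--         for k in range(1, i):
--             cost = 2 * dp[k] + (2 ** (i - k)) - 1
--             if cost < dp[i]:
--                 dp[i] = cost
--                 k_opt[i] = k
--
--     def three_peg(n, src, tgt, aux):
--         """Standard 3-peg recursive helper"""
--         if n == 0:
--             return
--         if n == 1:
--             moves.append((src, tgt))
--             return
--         three_peg(n - 1, src, aux, tgt)
--         moves.append((src, tgt))
--         three_peg(n - 1, aux, tgt, src)
--
--     def four_peg(n, src, tgt, a1, a2):
--         """4-peg recursive using Frame-Stewart strategy"""
--         if n == 0:
--             return
--         if n == 1: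
--             moves.append((src, tgt))
--             return
--
--         k = k_opt[n]
--         four_peg(k, src, a2, a1, tgt)      # Move k disks to aux2 using 4 pegs
--         three_peg(n - k, src, tgt, a1)     # Move n-k disks to target using 3 pegs
--         four_peg(k, a2, tgt, src, a1)      # Move k disks to target using 4 pegs
--
--     four_peg(n, source, target, aux1, aux2)
--     return moves
-- ===== SOURCE B (Python) =====
-- def hanoi_frame_stewart(n, source='A', target='D', aux1='B', aux2='C'):
--     if not isinstance(n, int) or n < 0:
--         raise ValueError("Number of disks must be a non-negative integer")
--     if n == 0:
--         return []
--     dp = [0, 1]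
--     k_opt = [0, 0]
--     for i in range(2, n + 1):
--         k = min(range(1, i), key=lambda k: 2 * dp[k] + 2 ** (i - k) - 1)
--         dp.append(2 * dp[k] + 2 ** (i - k) - 1)
--         k_opt.append(k)
--     moves = []
--     append = moves.append
--     stack = [(True, n, source, target, aux1, aux2)]
--     push = stack.append
--     pop = stack.pop
--     while stack:
--         four, m, src, tgt, a1, a2 = pop()
--         if m == 1:
--             append((src, tgt))
--         elif four:
--             k = k_opt[m]
--             push((True, k, a2, tgt, src, a1))
--             push((False, m - k, src, tgt, a1, None))
--             push((True, k, src, a2, a1, tgt))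
--         elif m > 0:
--             push((False, m - 1, a1, tgt, src, None))
--             push((False, 1, src, tgt, None, None))
--             push((False, m - 1, src, a1, tgt, None))
--     return moves
-- ===== Notes on version B (the rewrite author's own statement) =====
-- stated objective: alternative
-- what changed: The mutually recursive four_peg/three_peg move generation is replaced by an iterative explicit job stack (pop a job, emit or push its subtasks in reverse), and the dict-based DP with a hand-written strict-min inner scan is replaced by list tables with min(range(1,i), key=...).
import Mathlib
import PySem

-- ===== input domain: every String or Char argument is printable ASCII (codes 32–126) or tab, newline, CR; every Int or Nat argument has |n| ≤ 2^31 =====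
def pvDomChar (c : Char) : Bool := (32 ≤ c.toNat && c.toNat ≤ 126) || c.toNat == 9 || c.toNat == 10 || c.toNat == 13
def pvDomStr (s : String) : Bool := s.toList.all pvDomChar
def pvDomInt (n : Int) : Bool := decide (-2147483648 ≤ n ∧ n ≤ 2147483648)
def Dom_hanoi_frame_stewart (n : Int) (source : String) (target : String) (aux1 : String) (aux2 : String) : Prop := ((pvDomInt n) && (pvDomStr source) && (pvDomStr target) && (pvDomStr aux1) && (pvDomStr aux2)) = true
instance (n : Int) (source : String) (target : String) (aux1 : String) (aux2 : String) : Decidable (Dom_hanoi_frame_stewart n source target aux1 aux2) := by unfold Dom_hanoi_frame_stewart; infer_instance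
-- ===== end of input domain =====

-- B rewrites A's mutually recursive move generation as an explicit job stack (iterative)
-- and replaces the dict-based DP inner scan by list tables with min(..., key=...); same moves.

-- ===== PORT A =====
-- three_peg: Python recurses on n-1; every call site passes n ≥ 1, so Nat recursion is exact.
def threePegA : Nat → String → String → String → List (String × String)
  | 0, _, _, _ => []
  | 1, src, tgt, _ => [(src, tgt)]
  | m + 2, src, tgt, aux =>
      threePegA (m + 1) src aux tgt ++ [(src, tgt)] ++ threePegA (m + 1) aux tgt src

-- inner loop 'for k in range(1, i)': accumulator none = float('inf') (cost < inf is always true);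
-- dp[k] is present for every 0 ≤ k < i, so Dict.getD never sees its default.
def scanA (dp : PySem.Dict Int Int) (i : Int) : Option (Int × Int) :=
  (PySem.List.pyRange 1 i 1).foldl
    (fun acc k =>
      let cost := 2 * dp.getD k 0 + 2 ^ (i - k).toNat - 1
      match acc with
      | none => some (cost, k)
      | some (best, kb) => if cost < best then some (cost, k) else some (best, kb))
    none

-- 'for i in range(2, n + 1)' building dp and k_opt (the none branch is unreachable: range(1,i) ≠ [] for i ≥ 2)
def buildA (n : Int) : PySem.Dict Int Int × PySem.Dict Int Int :=
  (PySem.List.pyRange 2 (n + 1) 1).foldl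
    (fun st i =>
      match scanA st.1 i with
      | some ck => (st.1.insert i ck.1, st.2.insert i ck.2)
      | none => (st.1.insert i 0, st.2))
    (((PySem.Dict.empty).insert 0 0).insert 1 1, ((PySem.Dict.empty).insert 0 0).insert 1 0)

-- four_peg: fuel makes the recursion total; k_opt[m] < m, so fuel = n.toNat is never exhausted.
def fourPegA (kopt : PySem.Dict Int Int) : Nat → Int → String → String → String → String → List (String × String)
  | 0, _, _, _, _, _ => []
  | fuel + 1, m, src, tgt, a1, a2 =>
      if m = 0 then []
      else if m = 1 then [(src, tgt)]
      else
        let k := kopt.getD m 0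
        fourPegA kopt fuel k src a2 a1 tgt
          ++ threePegA (m - k).toNat src tgt a1
          ++ fourPegA kopt fuel k a2 tgt src a1

def hanoi_frame_stewart (n : Int) (source : String) (target : String) (aux1 : String) (aux2 : String) : List (String × String) :=
  if n < 0 then []        -- Python raises ValueError here; excluded by Pre_
  else if n = 0 then []
  else fourPegA (buildA n).2 n.toNat n source target aux1 aux2

-- ===== PORT B =====
-- pending jobs: F = 4-peg task, T = 3-peg task
inductive JobB where
  | F : Int → String → String → String → String → JobB
  | T : Int → String → String → String → JobB
deriving DecidableEq

-- dp[k] / k_opt[m]: index always in range at every use site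
def costB (dp : List Int) (i k : Int) : Int := 2 * PySem.List.pyGetD dp k 0 + 2 ^ (i - k).toNat - 1

def buildB (n : Int) : List Int × List Int :=
  (PySem.List.pyRange 2 (n + 1) 1).foldl
    (fun st i =>
      match PySem.List.min? (PySem.List.pyRange 1 i 1) (fun k => costB st.1 i k) with
      | some k => (st.1 ++ [costB st.1 i k], st.2 ++ [k])
      | none => st)    -- unreachable: range(1, i) ≠ [] for i ≥ 2 (Python's min would raise)
    ([0, 1], [0, 0])

-- the while-stack loop; fuel makes it total and is never exhausted from the top-level call
def runB (kopt : List Int) : Nat → List JobB → List (String × String) → List (String × String)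
  | 0, _, moves => moves
  | _ + 1, [], moves => moves
  | fuel + 1, job :: stack, moves =>
    match job with
    | .F m src tgt a1 a2 =>
      if m = 1 then runB kopt fuel stack (moves ++ [(src, tgt)])
      else
        let k := PySem.List.pyGetD kopt m 0
        runB kopt fuel
          (.F k src a2 a1 tgt :: .T (m - k) src tgt a1 :: .F k a2 tgt src a1 :: stack) moves
    | .T m src tgt aux =>
      if m = 1 then runB kopt fuel stack (moves ++ [(src, tgt)])
      else if 0 < m then
        runB kopt fuel
          (.T (m - 1) src aux tgt :: .T 1 src tgt aux :: .T (m - 1) aux tgt src :: stack) moves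
      else runB kopt fuel stack moves

def hanoi_frame_stewart_alt (n : Int) (source : String) (target : String) (aux1 : String) (aux2 : String) : List (String × String) :=
  if n < 0 then []        -- Python raises ValueError here; excluded by Pre_
  else if n = 0 then []
  else runB (buildB n).2 (4 ^ n.toNat) [.F n source target aux1 aux2] []

-- ===== PRECONDITION & SPEC =====
-- Pre_ excludes exactly the inputs where A raises ValueError (n < 0).
def Pre_hanoi_frame_stewart (n : Int) (source : String) (target : String) (aux1 : String) (aux2 : String) : Prop := 0 ≤ n
instance (n : Int) (source : String) (target : String) (aux1 : String) (aux2 : String) : Decidable (Pre_hanoi_frame_stewart n source target aux1 aux2) := by unfold Pre_hanoi_frame_stewart; infer_instance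
def pvWitness_hanoi_frame_stewart : Int × String × String × String × String := (3, "A", "D", "B", "C")

def Spec_hanoi_frame_stewart (n : Int) (source : String) (target : String) (aux1 : String) (aux2 : String) (out : List (String × String)) : Prop := out = hanoi_frame_stewart_alt n source target aux1 aux2
instance (n : Int) (source : String) (target : String) (aux1 : String) (aux2 : String) (out : List (String × String)) : Decidable (Spec_hanoi_frame_stewart n source target aux1 aux2 out) := by unfold Spec_hanoi_frame_stewart; infer_instance

-- ===== CLAIM (what is proved, stated in full; the proofs are below) =====
def Claim_equal_hanoi_frame_stewart : Prop := ∀ (n : Int) (source : String) (target : String) (aux1 : String) (aux2 : String), Dom_hanoi_frame_stewart n source target aux1 aux2 → Pre_hanoi_frame_stewart n source target aux1 aux2 → Spec_hanoi_frame_stewart n source target aux1 aux2 (hanoi_frame_stewart n source target aux1 aux2)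

-- ===== LEMMAS AND PROOFS =====

def scanStep (f : Int → Int) : Option (Int × Int) → Int → Option (Int × Int) :=
  fun acc k =>
    match acc with
    | none => some (f k, k)
    | some (best, kb) => if f k < best then some (f k, k) else some (best, kb)

def minStep (f : Int → Int) : Option Int → Int → Option Int :=
  fun acc x => match acc with
    | none => some x
    | some m => if f x < f m then some x else some m

theorem min?_eq_foldl (l : List Int) (f : Int → Int) :
    PySem.List.min? l f = List.foldl (minStep f) none l := by
  simp only [PySem.List.min?]
  apply PySem.List.foldl_congr_mem
  intro acc x _
  cases acc <;> rfl

theorem scan_fold_eq_min (f : Int → Int) : ∀ (l : List Int) (o : Option Int),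
    List.foldl (scanStep f) (o.map (fun k => (f k, k))) l
      = (List.foldl (minStep f) o l).map (fun k => (f k, k)) := by
  intro l
  induction l with
  | nil => intro o; simp
  | cons x t ih =>
    intro o
    have hstep : scanStep f (o.map (fun k => (f k, k))) x
        = (minStep f o x).map (fun k => (f k, k)) := by
      cases o with
      | none => rfl
      | some m =>
        simp only [Option.map_some, scanStep, minStep]
        split_ifs <;> rfl
    simp only [List.foldl_cons, hstep, ih]

-- scanA as min?, under agreeing lookups
theorem scanA_eq_min (dp : PySem.Dict Int Int) (dpB : List Int) (i : Int)
    (h : ∀ k : Int, 1 ≤ k → k < i → dp.getD k 0 = PySem.List.pyGetD dpB k 0) :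
    scanA dp i = (PySem.List.min? (PySem.List.pyRange 1 i 1) (fun k => costB dpB i k)).map
      (fun k => (costB dpB i k, k)) := by
  unfold scanA
  have hcongr : (PySem.List.pyRange 1 i 1).foldl
      (fun acc k =>
        let cost := 2 * dp.getD k 0 + 2 ^ (i - k).toNat - 1
        match acc with
        | none => some (cost, k)
        | some (best, kb) => if cost < best then some (cost, k) else some (best, kb))
      none
      = (PySem.List.pyRange 1 i 1).foldl (scanStep (fun k => costB dpB i k)) none := by
    apply PySem.List.foldl_congr_mem
    intro acc k hk
    rw [PySem.List.mem_pyRange_one] at hk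
    have hlk : dp.getD k 0 = PySem.List.pyGetD dpB k 0 := h k hk.1 hk.2
    simp only [scanStep, costB, hlk]
  rw [hcongr, min?_eq_foldl]
  exact scan_fold_eq_min (fun k => costB dpB i k) (PySem.List.pyRange 1 i 1) none

theorem buildA_succ (n : Int) (h : 1 ≤ n) :
    buildA (n + 1) = (match scanA (buildA n).1 (n + 1) with
      | some ck => ((buildA n).1.insert (n + 1) ck.1, (buildA n).2.insert (n + 1) ck.2)
      | none => ((buildA n).1.insert (n + 1) 0, (buildA n).2)) := by
  unfold buildA
  rw [PySem.List.pyRange_one_succ_right (by omega : (2:Int) ≤ n + 1), List.foldl_append]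
  simp

theorem buildB_succ (n : Int) (h : 1 ≤ n) :
    buildB (n + 1) = (match PySem.List.min? (PySem.List.pyRange 1 (n + 1) 1)
        (fun k => costB (buildB n).1 (n + 1) k) with
      | some k => ((buildB n).1 ++ [costB (buildB n).1 (n + 1) k], (buildB n).2 ++ [k])
      | none => buildB n) := by
  unfold buildB
  rw [PySem.List.pyRange_one_succ_right (by omega : (2:Int) ≤ n + 1), List.foldl_append]
  simp

def DPInv (n : Int) : Prop :=
  (buildB n).1.length = (n + 1).toNat ∧ (buildB n).2.length = (n + 1).toNat ∧
  (∀ j : Nat, (j : Int) ≤ n →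
      (buildA n).1.getD (j : Int) 0 = (buildB n).1.getD j 0 ∧
      (buildA n).2.getD (j : Int) 0 = (buildB n).2.getD j 0) ∧
  (∀ j : Nat, 2 ≤ j → (j : Int) ≤ n →
      1 ≤ (buildA n).2.getD (j : Int) 0 ∧ (buildA n).2.getD (j : Int) 0 < (j : Int))

theorem dpinv_holds (N : Nat) : DPInv ((N : Int) + 1) := by
  induction N with
  | zero =>
    refine ⟨by decide, by decide, ?_, ?_⟩
    · intro j hj
      have : j ≤ 1 := by exact_mod_cast hj
      interval_cases j <;> constructor <;> decide
    · intro j h2 hj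
      have : j ≤ 1 := by exact_mod_cast hj
      omega
  | succ N ih =>
    obtain ⟨hL1, hL2, hget, hbound⟩ := ih
    have hcast : ((N + 1 : Nat) : Int) + 1 = ((N : Int) + 1) + 1 := by push_cast; ring
    rw [hcast]
    set n := (N : Int) + 1 with hn
    have hn1 : 1 ≤ n := by omega
    -- the agreed key lookups below i = n + 1
    have hlk : ∀ k : Int, 1 ≤ k → k < n + 1 → (buildA n).1.getD k 0 = PySem.List.pyGetD (buildB n).1 k 0 := by
      intro k h1 h2
      have hk : ((k.toNat : Nat) : Int) = k := by omega
      rw [← hk, PySem.List.pyGetD_natCast]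
      exact (hget k.toNat (by omega)).1
    have hscan := scanA_eq_min (buildA n).1 (buildB n).1 (n + 1) hlk
    -- min? is some: the range is nonempty
    cases hmin : PySem.List.min? (PySem.List.pyRange 1 (n + 1) 1) (fun k => costB (buildB n).1 (n + 1) k) with
    | none =>
      exfalso
      have : (1 : Int) ∈ PySem.List.pyRange 1 (n + 1) 1 := by
        rw [PySem.List.mem_pyRange_one]; omega
      rw [PySem.List.min?_eq_none_iff] at hmin
      simp [hmin] at this
    | some kmin =>
      have hkb : 1 ≤ kmin ∧ kmin < n + 1 := by
        have := PySem.List.min?_mem hmin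
        rwa [PySem.List.mem_pyRange_one] at this
      rw [hmin, Option.map_some] at hscan
      have hA := buildA_succ n hn1
      rw [hscan] at hA
      have hB := buildB_succ n hn1
      rw [hmin] at hB
      -- both steps reduced
      simp only [] at hA hB
      set c := costB (buildB n).1 (n + 1) kmin with hc
      have hLen : (buildB n).1.length = N + 2 := by rw [hL1]; omega
      have hLen2 : (buildB n).2.length = N + 2 := by rw [hL2]; omega
      refine ⟨?_, ?_, ?_, ?_⟩
      · rw [hB]; simp [hLen]; omega
      · rw [hB]; simp [hLen2]; omega
      · intro j hj
        rw [hA, hB]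
        by_cases hje : (j : Int) = n + 1
        · have hjn : j = N + 2 := by omega
          subst hjn
          constructor
          · rw [PySem.Dict.getD_insert]
            simp only [hje]
            rw [← hLen]
            simp [List.getD]
          · rw [PySem.Dict.getD_insert]
            simp only [hje]
            rw [← hLen2]
            simp [List.getD]
        · have hjlt : (j : Int) ≤ n := by omega
          have hjlt' : j < N + 2 := by omega
          have := hget j hjlt
          constructor
          · rw [PySem.Dict.getD_insert, if_neg hje, this.1]
            simp [List.getD, List.getElem?_append_left (show j < (buildB n).1.length by omega)]
          · rw [PySem.Dict.getD_insert, if_neg hje, this.2]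
            simp [List.getD, List.getElem?_append_left (show j < (buildB n).2.length by omega)]
      · intro j h2 hj
        rw [hA]
        by_cases hje : (j : Int) = n + 1
        · rw [PySem.Dict.getD_insert, if_pos hje]
          omega
        · rw [PySem.Dict.getD_insert, if_neg hje]
          exact hbound j h2 (by omega)

theorem fourPegA_fuel (kA : PySem.Dict Int Int) (n : Int)
    (Hk : ∀ m : Int, 2 ≤ m → m ≤ n → 1 ≤ kA.getD m 0 ∧ kA.getD m 0 < m) :
    ∀ (t : Nat) (m : Int) (f f' : Nat) (s tg a1 a2 : String), m.toNat ≤ t → 1 ≤ m → m ≤ n →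
      m.toNat ≤ f → m.toNat ≤ f' →
      fourPegA kA f m s tg a1 a2 = fourPegA kA f' m s tg a1 a2 := by
  intro t
  induction t with
  | zero => intro m f f' s tg a1 a2 ht h1; omega
  | succ t ih =>
    intro m f f' s tg a1 a2 ht h1 hn hf hf'
    obtain ⟨f0, rfl⟩ : ∃ f0, f = f0 + 1 := ⟨f - 1, by omega⟩
    obtain ⟨f0', rfl⟩ : ∃ f0', f' = f0' + 1 := ⟨f' - 1, by omega⟩
    by_cases hm1 : m = 1
    · subst hm1; simp [fourPegA]
    · have hm2 : 2 ≤ m := by omega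
      have hk := Hk m hm2 hn
      simp only [fourPegA, if_neg (by omega : ¬ m = 0), if_neg hm1]
      have h1' := ih (kA.getD m 0) f0 f0' s a2 a1 tg (by omega) (by omega) (by omega) (by omega) (by omega)
      have h2' := ih (kA.getD m 0) f0 f0' a2 tg s a1 (by omega) (by omega) (by omega) (by omega) (by omega)
      rw [h1', h2']

def emitJ (kA : PySem.Dict Int Int) : JobB → List (String × String)
  | .F m s t a1 a2 => fourPegA kA m.toNat m s t a1 a2
  | .T m s t a => threePegA m.toNat s t a

def WFJ (n : Int) : JobB → Prop
  | .F m _ _ _ _ => 1 ≤ m ∧ m ≤ n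
  | .T m _ _ _ => 1 ≤ m

def costJ : JobB → Nat
  | .F m _ _ _ _ => 4 ^ m.toNat
  | .T m _ _ _ => 4 ^ m.toNat

theorem costJ_pos (j : JobB) : 1 ≤ costJ j := by
  cases j <;> exact Nat.one_le_pow _ _ (by norm_num)

theorem pow4_le {a b : Nat} (h : a ≤ b) : 4 ^ a ≤ 4 ^ b :=
  Nat.pow_le_pow_right (by norm_num) h

theorem runB_emit (kA : PySem.Dict Int Int) (kB : List Int) (n : Int)
    (Hlook : ∀ m : Int, 2 ≤ m → m ≤ n → PySem.List.pyGetD kB m 0 = kA.getD m 0)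
    (Hk : ∀ m : Int, 2 ≤ m → m ≤ n → 1 ≤ kA.getD m 0 ∧ kA.getD m 0 < m) :
    ∀ (fuel : Nat) (jobs : List JobB) (moves : List (String × String)),
      (∀ j ∈ jobs, WFJ n j) → (jobs.map costJ).sum ≤ fuel →
      runB kB fuel jobs moves = moves ++ jobs.flatMap (emitJ kA) := by
  intro fuel
  induction fuel with
  | zero =>
    intro jobs moves hwf hc
    cases jobs with
    | nil => simp [runB]
    | cons j rest =>
      exfalso
      have := costJ_pos j
      simp [List.map_cons] at hc
      omega
  | succ f ih =>
    intro jobs moves hwf hc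
    cases jobs with
    | nil => simp [runB]
    | cons j rest =>
      have hwfr : ∀ j ∈ rest, WFJ n j := fun x hx => hwf x (List.mem_cons_of_mem _ hx)
      have hcr : ((j :: rest).map costJ).sum = costJ j + (rest.map costJ).sum := by simp
      cases j with
      | F m s t a1 a2 =>
        have hwfj : 1 ≤ m ∧ m ≤ n := hwf _ (List.mem_cons_self)
        by_cases hm1 : m = 1
        · subst hm1
          have h1 : runB kB (f + 1) (.F 1 s t a1 a2 :: rest) moves
              = runB kB f rest (moves ++ [(s, t)]) := by
            simp [runB]
          rw [h1, ih rest _ hwfr (by simp only [List.map_cons, List.sum_cons, costJ, Int.toNat_one, pow_one] at hc; omega)]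
          simp [emitJ, fourPegA]
        · have hm2 : 2 ≤ m := by omega
          have hlook := Hlook m hm2 hwfj.2
          have hk := Hk m hm2 hwfj.2
          set κ := kA.getD m 0 with hκ
          have hstep : runB kB (f + 1) (.F m s t a1 a2 :: rest) moves
              = runB kB f (.F κ s a2 a1 t :: .T (m - κ) s t a1 :: .F κ a2 t s a1 :: rest) moves := by
            simp [runB, if_neg hm1, hlook]
          -- cost bookkeeping
          have hmt : 2 ≤ m.toNat := by omega
          have e4 : 4 ^ m.toNat = 4 * 4 ^ (m.toNat - 1) := by
            rw [← Nat.pow_succ']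
            congr 1
            omega
          have c1 : 4 ^ κ.toNat ≤ 4 ^ (m.toNat - 1) := pow4_le (by omega)
          have c2 : 4 ^ (m - κ).toNat ≤ 4 ^ (m.toNat - 1) := pow4_le (by omega)
          have hx1 : 1 ≤ 4 ^ (m.toNat - 1) := Nat.one_le_pow _ _ (by norm_num)
          have hc' : ((JobB.F κ s a2 a1 t :: .T (m - κ) s t a1 :: .F κ a2 t s a1 :: rest).map costJ).sum ≤ f := by
            simp only [List.map_cons, List.sum_cons, costJ] at hc ⊢
            rw [e4] at hc
            omega
          have hwf' : ∀ x ∈ (JobB.F κ s a2 a1 t :: .T (m - κ) s t a1 :: .F κ a2 t s a1 :: rest), WFJ n x := by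
            intro x hx
            simp only [List.mem_cons] at hx
            rcases hx with rfl | rfl | rfl | hx
            · exact ⟨by omega, by omega⟩
            · exact (by omega : (1:Int) ≤ m - κ)
            · exact ⟨by omega, by omega⟩
            · exact hwfr x hx
          rw [hstep, ih _ _ hwf' hc']
          -- now identify emitJ (F m) with the three children emissions
          obtain ⟨p, hp⟩ : ∃ p, m.toNat = p + 1 := ⟨m.toNat - 1, by omega⟩
          have hemit : emitJ kA (.F m s t a1 a2)
              = emitJ kA (.F κ s a2 a1 t) ++ emitJ kA (.T (m - κ) s t a1) ++ emitJ kA (.F κ a2 t s a1) := by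
            simp only [emitJ, hp, fourPegA, if_neg (by omega : ¬ m = 0), if_neg hm1, ← hκ]
            have hf1 := fourPegA_fuel kA n Hk κ.toNat κ p κ.toNat s a2 a1 t (le_refl _) (by omega) (by omega) (by omega) (by omega)
            have hf2 := fourPegA_fuel kA n Hk κ.toNat κ p κ.toNat a2 t s a1 (le_refl _) (by omega) (by omega) (by omega) (by omega)
            rw [hf1, hf2]
          simp only [List.flatMap_cons, hemit]
          simp [List.append_assoc]
      | T m s t a =>
        have hwfj : 1 ≤ m := hwf _ (List.mem_cons_self)
        by_cases hm1 : m = 1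
        · subst hm1
          have h1 : runB kB (f + 1) (.T 1 s t a :: rest) moves
              = runB kB f rest (moves ++ [(s, t)]) := by
            simp [runB]
          rw [h1, ih rest _ hwfr (by simp only [List.map_cons, List.sum_cons, costJ, Int.toNat_one, pow_one] at hc; omega)]
          simp [emitJ, threePegA]
        · have hm2 : 2 ≤ m := by omega
          have hstep : runB kB (f + 1) (.T m s t a :: rest) moves
              = runB kB f (.T (m - 1) s a t :: .T 1 s t a :: .T (m - 1) a t s :: rest) moves := by
            simp [runB, if_neg hm1, if_pos (by omega : (0:Int) < m)]
          have hmt : 2 ≤ m.toNat := by omega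
          have e4 : 4 ^ m.toNat = 4 * 4 ^ (m.toNat - 1) := by
            rw [← Nat.pow_succ']
            congr 1
            omega
          have c2 : (4:Nat) ^ (1:Int).toNat ≤ 4 ^ (m.toNat - 1) := pow4_le (by omega)
          have hx1 : 1 ≤ 4 ^ (m.toNat - 1) := Nat.one_le_pow _ _ (by norm_num)
          have h41 : (4:Nat) ^ (1:Int).toNat = 4 := by norm_num
          have hceq : (4:Nat) ^ (m - 1).toNat = 4 ^ (m.toNat - 1) := by
            rw [show (m - 1).toNat = m.toNat - 1 by omega]
          have hc' : ((JobB.T (m - 1) s a t :: .T 1 s t a :: .T (m - 1) a t s :: rest).map costJ).sum ≤ f := by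
            simp only [List.map_cons, List.sum_cons, costJ] at hc ⊢
            rw [e4] at hc
            rw [h41, hceq]
            omega
          have hwf' : ∀ x ∈ (JobB.T (m - 1) s a t :: .T 1 s t a :: .T (m - 1) a t s :: rest), WFJ n x := by
            intro x hx
            simp only [List.mem_cons] at hx
            rcases hx with rfl | rfl | rfl | hx
            · exact (by omega : (1:Int) ≤ m - 1)
            · exact (by omega : (1:Int) ≤ 1)
            · exact (by omega : (1:Int) ≤ m - 1)
            · exact hwfr x hx
          rw [hstep, ih _ _ hwf' hc']
          obtain ⟨p, hp⟩ : ∃ p, m.toNat = p + 2 := ⟨m.toNat - 2, by omega⟩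
          have hp1 : (m - 1).toNat = p + 1 := by omega
          have hemit : emitJ kA (.T m s t a)
              = emitJ kA (.T (m - 1) s a t) ++ emitJ kA (.T 1 s t a) ++ emitJ kA (.T (m - 1) a t s) := by
            simp only [emitJ, hp, hp1, threePegA]
            rfl
          simp only [List.flatMap_cons, hemit]
          simp [List.append_assoc]

-- ===== VERDICT (by name: the statement is the Claim_ definition above) =====
theorem hanoi_frame_stewart_spec : Claim_equal_hanoi_frame_stewart := by
  intro n source target aux1 aux2 _ hpre
  unfold Pre_hanoi_frame_stewart at hpre
  unfold Spec_hanoi_frame_stewart hanoi_frame_stewart hanoi_frame_stewart_alt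
  by_cases hn0 : n = 0
  · simp [hn0]
  · rw [if_neg (by omega : ¬ n < 0), if_neg hn0, if_neg (by omega : ¬ n < 0), if_neg hn0]
    have hn1 : 1 ≤ n := by omega
    obtain ⟨N, hN⟩ : ∃ N : Nat, n = (N : Int) + 1 := ⟨(n - 1).toNat, by omega⟩
    have hdp := dpinv_holds N
    rw [← hN] at hdp
    obtain ⟨hL1, hL2, hget, hbound⟩ := hdp
    have Hlook : ∀ m : Int, 2 ≤ m → m ≤ n →
        PySem.List.pyGetD (buildB n).2 m 0 = (buildA n).2.getD m 0 := by
      intro m h2 hm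
      have hk : ((m.toNat : Nat) : Int) = m := by omega
      rw [← hk, PySem.List.pyGetD_natCast]
      exact ((hget m.toNat (by omega)).2).symm
    have Hk : ∀ m : Int, 2 ≤ m → m ≤ n →
        1 ≤ (buildA n).2.getD m 0 ∧ (buildA n).2.getD m 0 < m := by
      intro m h2 hm
      have hk : ((m.toNat : Nat) : Int) = m := by omega
      rw [← hk]
      exact hbound m.toNat (by omega) (by omega)
    rw [runB_emit (buildA n).2 (buildB n).2 n Hlook Hk (4 ^ n.toNat)
        [.F n source target aux1 aux2] []
        (by intro j hj; simp at hj; subst hj; exact ⟨hn1, le_refl n⟩)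
        (by simp [costJ])]
    simp [emitJ]
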